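-- pv_equiv track=rewrite | github.com/RK1905101/Mini_Python_Projects | WordLadder/game.py | has_valid_ladder
-- ===== SOURCE A (Python) =====
-- from collections import deque
-- import string
--
-- def get_neighbors(word, valid_words):
--     """All one-letter transformations within the valid word set."""
--     neighbors = []
--     for i in range(len(word)):
--         for c in string.ascii_lowercase:
--             if c != word[i]:
--                 candidate = word[:i] + c + word[i+1:]
--                 if candidate in valid_words:
--                     neighbors.append(candidate)
--     return neighbors
--
-- def has_valid_ladder(start, target, valid_words, max_depth=10):
--     """Shallow BFS to ensure ladder exists."""
--     visited = set([start])
--     queue = deque([(start, 0)])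
--
--     while queue:
--         current, depth = queue.popleft()
--         if depth > max_depth:
--             return False
--
--         for neighbor in get_neighbors(current, valid_words):
--             if neighbor == target:
--                 return True
--             if neighbor not in visited:
--                 visited.add(neighbor)
--                 queue.append((neighbor, depth + 1))
--
--     return False
-- ===== SOURCE B (Python) =====
-- from collections import deque
-- import string
--
-- def _build_index(valid_words):
--     """Map each hole (i, word-with-position-i-deleted) to the set of lowercase
--     letters occurring at position i in some valid word with that remainder."""
--     index = {}
--     for w in valid_words:
--         for i in range(len(w)):
--             ch = w[i]
--             if ch in string.ascii_lowercase:
--                 index.setdefault((i, w[:i] + w[i+1:]), set()).add(ch)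
--     return index
--
-- def _neighbors(word, index):
--     out = []
--     for i in range(len(word)):
--         for c in sorted(index.get((i, word[:i] + word[i+1:]), set())):
--             if c != word[i]:
--                 out.append(word[:i] + c + word[i+1:])
--     return out
--
-- def has_valid_ladder(start, target, valid_words, max_depth=10):
--     """Level-by-level BFS over whole frontiers; neighbors from a one-hole index."""
--     index = _build_index(valid_words)
--     visited = {start}
--     frontier = [start]
--     depth = 0
--     while frontier:
--         if depth > max_depth:
--             return False
--         next_frontier = []
--         for current in frontier:
--             for neighbor in _neighbors(current, index):
--                 if neighbor == target:
--                     return True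
--                 if neighbor not in visited:
--                     visited.add(neighbor)
--                     next_frontier.append(neighbor)
--         frontier = next_frontier
--         depth += 1
--     return False
-- ===== Notes on version B (the rewrite author's own statement) =====
-- stated objective: faster
-- what changed: B precomputes a one-hole pattern index (dict mapping (i, word-with-position-i-deleted) to the set of letters at i) once from valid_words and replaces the deque-of-(word,depth) BFS by a level-by-level BFS over whole frontier lists with an explicit depth counter, so each node's neighbors come from len(word) dict lookups instead of 26*len(word) linear scans of valid_words.
import Mathlib
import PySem

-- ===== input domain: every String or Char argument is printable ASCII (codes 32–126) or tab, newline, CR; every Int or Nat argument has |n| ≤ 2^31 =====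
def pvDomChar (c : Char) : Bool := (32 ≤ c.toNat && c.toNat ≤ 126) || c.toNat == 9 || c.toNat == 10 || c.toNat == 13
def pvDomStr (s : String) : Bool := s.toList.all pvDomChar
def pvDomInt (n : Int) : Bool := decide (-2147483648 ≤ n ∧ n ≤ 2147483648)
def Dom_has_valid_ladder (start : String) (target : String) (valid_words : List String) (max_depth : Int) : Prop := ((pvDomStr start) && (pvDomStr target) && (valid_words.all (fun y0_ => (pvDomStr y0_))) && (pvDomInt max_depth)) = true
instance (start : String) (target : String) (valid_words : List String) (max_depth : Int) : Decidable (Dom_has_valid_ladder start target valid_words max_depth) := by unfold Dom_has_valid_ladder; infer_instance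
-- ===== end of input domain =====

-- B builds a one-hole pattern index (a dict of char-sets) once from valid_words and runs a
-- level-by-level BFS over whole frontier lists with a depth counter, instead of A's
-- deque-of-(word,depth) BFS whose neighbor step scans valid_words 26·len(word) times per node.

-- ===== PORT A =====

-- string.ascii_lowercase
def pvLower : List Char := "abcdefghijklmnopqrstuvwxyz".toList

-- word[:i] + c + word[i+1:]  (exact for 0 ≤ i < w.length, the only use)
def pvSub (w : List Char) (i : Nat) (c : Char) : List Char :=
  w.take i ++ c :: w.drop (i + 1)

-- get_neighbors: 'for i in range(len(word)): for c in ascii_lowercase: …'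
-- (word[i] ported as getD i ' ' — exact, since i < length throughout the range loop)
def get_neighbors (word : String) (valid_words : List String) : List String :=
  (List.range word.toList.length).foldl (fun neighbors i =>
    pvLower.foldl (fun neighbors c =>
      if c ≠ word.toList.getD i ' ' then
        let candidate := String.ofList (pvSub word.toList i c)
        if valid_words.contains candidate then neighbors ++ [candidate] else neighbors
      else neighbors) neighbors) []

-- the inner 'for neighbor in get_neighbors(…)' loop with its early 'return True'
def pvScanA (target : String) :
    List String → PySem.Set String → List (String × Int) → Int →
    Bool × PySem.Set String × List (String × Int)
  | [], visited, queue, _ => (false, visited, queue)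
  | n :: rest, visited, queue, depth =>
    if n = target then (true, visited, queue)
    else if PySem.Set.contains visited n then pvScanA target rest visited queue depth
    else pvScanA target rest (PySem.Set.add visited n) (queue ++ [(n, depth + 1)]) depth

-- the 'while queue' loop; the fuel only makes it total: every enqueued word after the first
-- is a fresh member of valid_words, so iterations ≤ valid_words.length + 1 < fuel
def pvLoopA (target : String) (valid_words : List String) (max_depth : Int) :
    Nat → List (String × Int) → PySem.Set String → Bool
  | 0, _, _ => false
  | _ + 1, [], _ => false
  | fuel + 1, (current, depth) :: rest, visited =>
    if depth > max_depth then false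
    else
      let r := pvScanA target (get_neighbors current valid_words) visited rest depth
      if r.1 then true else pvLoopA target valid_words max_depth fuel r.2.2 r.2.1

def has_valid_ladder (start : String) (target : String) (valid_words : List String) (max_depth : Int) : Bool :=
  pvLoopA target valid_words max_depth (valid_words.length + 2) [(start, 0)] (PySem.Set.ofList [start])

-- ===== PORT B =====

-- w[:i] + w[i+1:]  (the one-hole remainder)
def pvHole (w : List Char) (i : Nat) : List Char := w.take i ++ w.drop (i + 1)

-- _build_index: dict keyed by (i, remainder); 'ch = w[i]' inlined;
-- setdefault(k, set()).add(ch) = insert k (Set.add (getD k ∅) ch)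
def pvBuildIndex (valid_words : List String) : PySem.Dict (Nat × List Char) (PySem.Set Char) :=
  valid_words.foldl (fun index w =>
    (List.range w.toList.length).foldl (fun index i =>
      if pvLower.contains (w.toList.getD i ' ') then
        index.insert (i, pvHole w.toList i)
          (PySem.Set.add (index.getD (i, pvHole w.toList i) PySem.Set.empty) (w.toList.getD i ' '))
      else index) index) PySem.Dict.empty

-- _neighbors: 'for c in sorted(index.get((i, …), set())): …'
def pvNeighborsB (word : String) (index : PySem.Dict (Nat × List Char) (PySem.Set Char)) : List String :=
  (List.range word.toList.length).foldl (fun out i =>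
    (PySem.List.sorted (index.getD (i, pvHole word.toList i) PySem.Set.empty) (fun c => c) false).foldl
      (fun out c =>
        if c ≠ word.toList.getD i ' ' then out ++ [String.ofList (pvSub word.toList i c)] else out) out) []

-- 'for neighbor in _neighbors(current, index): …' — one frontier word's neighbors, updating
-- visited and the next frontier, with the early 'return True' as the Bool component
def pvScanL (target : String) :
    List String → PySem.Set String → List String → Bool × PySem.Set String × List String
  | [], visited, nxt => (false, visited, nxt)
  | n :: rest, visited, nxt =>
    if n = target then (true, visited, nxt)
    else if PySem.Set.contains visited n then pvScanL target rest visited nxt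
    else pvScanL target rest (PySem.Set.add visited n) (nxt ++ [n])

-- 'for current in frontier: …' — fuel is threaded through, consumed once per frontier word,
-- purely to totalise the outer while loop; .inl b = early answer / fuel exhausted
def pvExpand (target : String) (index : PySem.Dict (Nat × List Char) (PySem.Set Char)) :
    List String → PySem.Set String → List String → Nat →
    Bool ⊕ (PySem.Set String × List String × Nat)
  | [], visited, nxt, f => .inr (visited, nxt, f)
  | _ :: _, _, _, 0 => .inl false
  | w :: ws, visited, nxt, f + 1 =>
    let r := pvScanL target (pvNeighborsB w index) visited nxt
    if r.1 then .inl true else pvExpand target index ws r.2.1 r.2.2 f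

theorem pvExpand_fuel_le (target : String) (index : PySem.Dict (Nat × List Char) (PySem.Set Char)) :
    ∀ (l : List String) (vis : PySem.Set String) (nxt : List String) (f : Nat)
      (vis' : PySem.Set String) (nxt' : List String) (f' : Nat),
      pvExpand target index l vis nxt f = .inr (vis', nxt', f') → f' ≤ f := by
  intro l
  induction l with
  | nil => intro vis nxt f vis' nxt' f' h; unfold pvExpand at h; injection h with h; simp_all
  | cons w ws ih =>
    intro vis nxt f vis' nxt' f' h
    match f with
    | 0 => exact absurd h (by unfold pvExpand; simp)
    | f + 1 =>
      unfold pvExpand at h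
      by_cases hb : (pvScanL target (pvNeighborsB w index) vis nxt).1
      · rw [if_pos hb] at h; exact absurd h (by simp)
      · rw [if_neg hb] at h
        exact Nat.le_succ_of_le (ih _ _ _ _ _ _ h)

theorem pvExpand_fuel_lt (target : String) (index : PySem.Dict (Nat × List Char) (PySem.Set Char))
    (w : String) (ws : List String) (vis : PySem.Set String) (nxt : List String) (f : Nat)
    (vis' : PySem.Set String) (nxt' : List String) (f' : Nat)
    (h : pvExpand target index (w :: ws) vis nxt f = .inr (vis', nxt', f')) : f' < f := by
  match f with
  | 0 => exact absurd h (by unfold pvExpand; simp)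
  | f + 1 =>
    unfold pvExpand at h
    by_cases hb : (pvScanL target (pvNeighborsB w index) vis nxt).1
    · rw [if_pos hb] at h; exact absurd h (by simp)
    · rw [if_neg hb] at h
      exact Nat.lt_succ_of_le (pvExpand_fuel_le target index _ _ _ _ _ _ _ h)

-- 'while frontier: if depth > max_depth: return False; …' — level-by-level loop
def pvLevelLoop (target : String) (index : PySem.Dict (Nat × List Char) (PySem.Set Char))
    (max_depth : Int) (f : Nat) (depth : Int) (frontier : List String)
    (visited : PySem.Set String) : Bool :=
  match frontier with
  | [] => false
  | w :: ws =>
    if depth > max_depth then false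
    else
      match h : pvExpand target index (w :: ws) visited [] f with
      | .inl b => b
      | .inr (vis', nxt', f') => pvLevelLoop target index max_depth f' (depth + 1) nxt' vis'
termination_by f
decreasing_by exact pvExpand_fuel_lt target index w ws visited [] f vis' nxt' f' h

def has_valid_ladder_alt (start : String) (target : String) (valid_words : List String) (max_depth : Int) : Bool :=
  let index := pvBuildIndex valid_words
  pvLevelLoop target index max_depth (valid_words.length + 2) 0 [start] (PySem.Set.ofList [start])

-- ===== PRECONDITION & SPEC =====
def Spec_has_valid_ladder (start : String) (target : String) (valid_words : List String) (max_depth : Int) (out : Bool) : Prop := out = has_valid_ladder_alt start target valid_words max_depth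
instance (start : String) (target : String) (valid_words : List String) (max_depth : Int) (out : Bool) : Decidable (Spec_has_valid_ladder start target valid_words max_depth out) := by unfold Spec_has_valid_ladder; infer_instance

-- ===== CLAIM (what is proved, stated in full; the proofs are below) =====
def Claim_equal_has_valid_ladder : Prop := ∀ (start : String) (target : String) (valid_words : List String) (max_depth : Int), Dom_has_valid_ladder start target valid_words max_depth → Spec_has_valid_ladder start target valid_words max_depth (has_valid_ladder start target valid_words max_depth)

-- ===== LEMMAS AND PROOFS =====

-- rest with c put back into the hole at i
def pvRestore (rest : List Char) (i : Nat) (c : Char) : List Char :=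
  rest.take i ++ c :: rest.drop i

theorem pvRestore_hole (w : List Char) (i : Nat) (c : Char) (h : i ≤ w.length) :
    pvRestore (pvHole w i) i c = pvSub w i c := by
  unfold pvRestore pvHole pvSub
  rw [List.take_append_of_le_length (by simpa using h), List.drop_append_of_le_length (by simpa using h)]
  simp [List.take_take]

theorem pvSelf_restore (w : List Char) (i : Nat) (h : i < w.length) :
    w = pvRestore (pvHole w i) i (w.getD i ' ') := by
  rw [pvRestore_hole w i _ (le_of_lt h)]
  unfold pvSub
  rw [List.getD_eq_getElem w ' ' h, List.getElem_cons_drop, List.take_append_drop]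

theorem pvHole_sub (w : List Char) (i : Nat) (c : Char) (h : i ≤ w.length) :
    pvHole (pvSub w i c) i = pvHole w i := by
  unfold pvHole pvSub
  rw [List.take_append_of_le_length (by simpa using h), List.drop_append]
  simp [List.take_take, Nat.min_eq_left h, List.drop_take]

theorem pvSub_getD (w : List Char) (i : Nat) (c : Char) (h : i ≤ w.length) :
    (pvSub w i c).getD i ' ' = c := by
  unfold pvSub
  rw [List.getD_eq_getElem _ ' ' (by simp; omega)]
  rw [List.getElem_append_right (by simp [h])]
  simp [h]

theorem pvSub_length (w : List Char) (i : Nat) (c : Char) (h : i < w.length) :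
    (pvSub w i c).length = w.length := by
  unfold pvSub; simp; omega

-- the inner build loop over range(len(w)): exactly which chars land in the bucket at key (i, rest)
theorem pvBuild_inner (w : List Char) (d : PySem.Dict (Nat × List Char) (PySem.Set Char))
    (n i : Nat) (rest : List Char) (c : Char) :
    (c ∈ ((List.range n).foldl (fun index j =>
        if pvLower.contains (w.getD j ' ') then
          index.insert (j, pvHole w j)
            (PySem.Set.add (index.getD (j, pvHole w j) PySem.Set.empty) (w.getD j ' '))
        else index) d).getD (i, rest) PySem.Set.empty) ↔
      (c ∈ d.getD (i, rest) PySem.Set.empty ∨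
        (c ∈ pvLower ∧ i < n ∧ pvHole w i = rest ∧ w.getD i ' ' = c)) := by
  induction n generalizing i rest with
  | zero => simp
  | succ n ih =>
    rw [List.range_succ, List.foldl_append]
    simp only [List.foldl_cons, List.foldl_nil]
    by_cases hlc : pvLower.contains (w.getD n ' ')
    · rw [if_pos hlc, PySem.Dict.getD_insert]
      by_cases hk : (i, rest) = (n, pvHole w n)
      · rw [if_pos hk]
        obtain ⟨hi, hr⟩ : i = n ∧ rest = pvHole w n := Prod.mk.injEq .. ▸ hk
        subst hi; subst hr
        rw [PySem.Set.mem_add, ih]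
        constructor
        · rintro ((h | ⟨h1, h2, _, _⟩) | h)
          · exact Or.inl h
          · omega
          · exact Or.inr ⟨h ▸ (by simpa using hlc), by omega, rfl, h.symm⟩
        · rintro (h | ⟨h1, h2, h3, h4⟩)
          · exact Or.inl (Or.inl h)
          · exact Or.inr h4.symm
      · rw [if_neg hk, ih]
        constructor
        · rintro (h | ⟨h1, h2, h3, h4⟩)
          · exact Or.inl h
          · exact Or.inr ⟨h1, by omega, h3, h4⟩
        · rintro (h | ⟨h1, h2, h3, h4⟩)
          · exact Or.inl h
          · refine Or.inr ⟨h1, ?_, h3, h4⟩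
            rcases Nat.lt_succ_iff_lt_or_eq.mp h2 with h | h
            · exact h
            · exact absurd (by rw [h, ← h3, h]) hk
    · rw [if_neg hlc, ih]
      constructor
      · rintro (h | ⟨h1, h2, h3, h4⟩)
        · exact Or.inl h
        · exact Or.inr ⟨h1, by omega, h3, h4⟩
      · rintro (h | ⟨h1, h2, h3, h4⟩)
        · exact Or.inl h
        · refine Or.inr ⟨h1, ?_, h3, h4⟩
          rcases Nat.lt_succ_iff_lt_or_eq.mp h2 with h | h
          · exact h
          · exact absurd (h ▸ h4 ▸ h1) (by simpa using hlc)

-- the outer build loop over valid_words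
theorem pvBuild_mem_gen (vws : List String) (d : PySem.Dict (Nat × List Char) (PySem.Set Char))
    (i : Nat) (rest : List Char) (c : Char) :
    (c ∈ (vws.foldl (fun index w =>
      (List.range w.toList.length).foldl (fun index i =>
        if pvLower.contains (w.toList.getD i ' ') then
          index.insert (i, pvHole w.toList i)
            (PySem.Set.add (index.getD (i, pvHole w.toList i) PySem.Set.empty) (w.toList.getD i ' '))
        else index) index) d).getD (i, rest) PySem.Set.empty) ↔
      (c ∈ d.getD (i, rest) PySem.Set.empty ∨
        (c ∈ pvLower ∧ ∃ w ∈ vws, i < w.toList.length ∧ pvHole w.toList i = rest ∧ w.toList.getD i ' ' = c)) := by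
  induction vws generalizing d with
  | nil => simp
  | cons w ws ih =>
    rw [List.foldl_cons, ih, pvBuild_inner]
    constructor
    · rintro ((h | ⟨h1, h2, h3, h4⟩) | ⟨h1, w', hw', hr⟩)
      · exact Or.inl h
      · exact Or.inr ⟨h1, w, List.mem_cons_self, h2, h3, h4⟩
      · exact Or.inr ⟨h1, w', List.mem_cons_of_mem w hw', hr⟩
    · rintro (h | ⟨h1, w', hw', hr⟩)
      · exact Or.inl (Or.inl h)
      · rcases List.mem_cons.mp hw' with h | h
        · exact Or.inl (Or.inr ⟨h1, h ▸ hr⟩)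
        · exact Or.inr ⟨h1, w', h, hr⟩

theorem pvBuild_nodup_inner (w : List Char) (d : PySem.Dict (Nat × List Char) (PySem.Set Char))
    (n : Nat) (hd : ∀ k, (d.getD k PySem.Set.empty).Nodup) : ∀ (k : Nat × List Char),
    (((List.range n).foldl (fun index j =>
        if pvLower.contains (w.getD j ' ') then
          index.insert (j, pvHole w j)
            (PySem.Set.add (index.getD (j, pvHole w j) PySem.Set.empty) (w.getD j ' '))
        else index) d).getD k PySem.Set.empty).Nodup := by
  induction n generalizing d with
  | zero => exact hd
  | succ n ih =>
    intro k
    rw [List.range_succ, List.foldl_append]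
    simp only [List.foldl_cons, List.foldl_nil]
    by_cases hlc : pvLower.contains (w.getD n ' ')
    · rw [if_pos hlc, PySem.Dict.getD_insert]
      split_ifs with hk
      · exact PySem.Set.nodup_add _ _ (ih d hd _)
      · exact ih d hd k
    · rw [if_neg hlc]; exact ih d hd k

-- buckets are nodup (they are built with Set.add from Set.empty)
theorem pvBuild_nodup (vws : List String) : ∀ (k : Nat × List Char),
    ((pvBuildIndex vws).getD k PySem.Set.empty).Nodup := by
  unfold pvBuildIndex
  induction vws using List.reverseRecOn with
  | nil => simp
  | append_singleton ws w ih =>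
    rw [List.foldl_append, List.foldl_cons, List.foldl_nil]
    exact pvBuild_nodup_inner w.toList _ _ ih

-- the bucket at (i, hole word i), for i < len word, holds exactly the lowercase c
-- with word[:i]+c+word[i+1:] in valid_words
theorem pvBucket_mem (vws : List String) (word : List Char) (i : Nat) (c : Char) (h : i < word.length) :
    (c ∈ (pvBuildIndex vws).getD (i, pvHole word i) PySem.Set.empty) ↔
      (c ∈ pvLower ∧ vws.contains (String.ofList (pvSub word i c)) = true) := by
  unfold pvBuildIndex
  rw [pvBuild_mem_gen]
  simp only [PySem.Dict.getD_empty]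
  constructor
  · rintro (hmem | ⟨h1, w, hw, h2, h3, h4⟩)
    · simp at hmem
    · refine ⟨h1, ?_⟩
      have hw' : w.toList = pvSub word i c := by
        have := pvSelf_restore w.toList i h2
        rw [h3, h4] at this
        rw [this, pvRestore_hole word i c (le_of_lt h)]
      rw [List.contains_iff_mem, ← hw']
      simpa using hw
  · rintro ⟨h1, h2⟩
    refine Or.inr ⟨h1, String.ofList (pvSub word i c), by rw [← List.contains_iff_mem]; exact h2, ?_⟩
    rw [String.toList_ofList]
    exact ⟨by rw [pvSub_length word i c h]; exact h, pvHole_sub word i c (le_of_lt h),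
      pvSub_getD word i c (le_of_lt h)⟩

-- sorted(bucket) is the ascending filter of ascii_lowercase
theorem pvSorted_bucket (vws : List String) (word : List Char) (i : Nat) (h : i < word.length) :
    PySem.List.sorted ((pvBuildIndex vws).getD (i, pvHole word i) PySem.Set.empty) (fun c => c) false =
      pvLower.filter (fun c => decide (c ∈ (pvBuildIndex vws).getD (i, pvHole word i) PySem.Set.empty)) := by
  apply PySem.List.sorted_eq_of_perm_of_pairwise_lt
  · rw [List.perm_ext_iff_of_nodup (List.Nodup.filter _ (by decide)) (pvBuild_nodup vws _)]
    intro a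
    simp only [List.mem_filter, decide_eq_true_eq]
    exact ⟨fun ⟨_, hb⟩ => hb, fun hb => ⟨((pvBucket_mem vws word i a h).mp hb).1, hb⟩⟩
  · exact List.Pairwise.filter _ (by decide)

-- the neighbor lists of the two implementations are EQUAL, element for element
theorem pvNeighbors_eq (word : String) (vws : List String) :
    get_neighbors word vws = pvNeighborsB word (pvBuildIndex vws) := by
  unfold get_neighbors pvNeighborsB
  apply PySem.List.foldl_congr_mem
  intro acc i hi
  have h : i < word.toList.length := List.mem_range.mp hi
  rw [PySem.List.foldl_congr_mem pvLower _
        (fun acc c => if (decide (c ≠ word.toList.getD i ' ') &&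
            vws.contains (String.ofList (pvSub word.toList i c))) then
          acc ++ [String.ofList (pvSub word.toList i c)] else acc) acc
        (by
          intro a c _
          set wi := word.toList.getD i ' '
          by_cases h1 : c = wi <;> simp [h1])]
  rw [PySem.List.foldl_append_if, PySem.List.foldl_append_ite, pvSorted_bucket vws word.toList i h,
    List.filter_filter]
  congr 2
  apply List.filter_congr
  intro c hc
  have hb : decide (c ∈ (pvBuildIndex vws).getD (i, pvHole word.toList i) PySem.Set.empty) =
      vws.contains (String.ofList (pvSub word.toList i c)) := by
    by_cases hm : c ∈ (pvBuildIndex vws).getD (i, pvHole word.toList i) PySem.Set.empty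
    · rw [decide_eq_true hm]
      exact (((pvBucket_mem vws word.toList i c h).mp hm).2).symm
    · simp only [hm, decide_false]
      by_contra h'
      exact hm ((pvBucket_mem vws word.toList i c h).mpr ⟨hc, by simpa using (Bool.not_eq_false _).mp (Ne.symm h')⟩)
  rw [hb]

-- A's inner scan over a two-level queue is B's inner scan over the next frontier
theorem pvScan_level (target : String) (d : Int) : ∀ (l : List String)
    (vis : PySem.Set String) (ws nxt : List String),
    pvScanA target l vis (ws.map (fun w => (w, d)) ++ nxt.map (fun w => (w, d + 1))) d =
      ((pvScanL target l vis nxt).1, (pvScanL target l vis nxt).2.1,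
        ws.map (fun w => (w, d)) ++ (pvScanL target l vis nxt).2.2.map (fun w => (w, d + 1))) := by
  intro l
  induction l with
  | nil => intro vis ws nxt; rfl
  | cons n rest ih =>
    intro vis ws nxt
    unfold pvScanA pvScanL
    split_ifs with h1 h2
    · rfl
    · exact ih vis ws nxt
    · have : (ws.map (fun w => (w, d)) ++ nxt.map (fun w => (w, d + 1))) ++ [(n, d + 1)] =
          ws.map (fun w => (w, d)) ++ (nxt ++ [n]).map (fun w => (w, d + 1)) := by
        simp
      rw [this]
      exact ih (PySem.Set.add vis n) ws (nxt ++ [n])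

-- one whole BFS level: A's queue loop processes cur at depth d exactly as B's pvExpand does
theorem pvLevel_eq (target : String) (vws : List String) (max_depth : Int) (d : Int)
    (hd : ¬ d > max_depth) : ∀ (cur : List String) (vis : PySem.Set String)
    (nxt : List String) (f : Nat),
    pvLoopA target vws max_depth f
        (cur.map (fun w => (w, d)) ++ nxt.map (fun w => (w, d + 1))) vis =
      (match pvExpand target (pvBuildIndex vws) cur vis nxt f with
       | .inl b => b
       | .inr (vis', nxt', f') =>
           pvLoopA target vws max_depth f' (nxt'.map (fun w => (w, d + 1))) vis') := by
  intro cur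
  induction cur with
  | nil => intro vis nxt f; rfl
  | cons w ws ih =>
    intro vis nxt f
    match f with
    | 0 => rfl
    | f + 1 =>
      have hq : (w :: ws).map (fun w => (w, d)) ++ nxt.map (fun w => (w, d + 1)) =
          (w, d) :: (ws.map (fun w => (w, d)) ++ nxt.map (fun w => (w, d + 1))) := by simp
      rw [hq]
      conv_lhs => rw [pvLoopA]
      conv_rhs => rw [pvExpand]
      rw [if_neg hd, pvNeighbors_eq w vws, pvScan_level target d]
      simp only
      split_ifs with hb
      · rfl
      · exact ih _ _ f

-- the two while loops compute the same Bool for every fuel value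
theorem pvMain_eq (target : String) (vws : List String) (max_depth : Int) :
    ∀ (f : Nat) (d : Int) (frontier : List String) (vis : PySem.Set String),
    pvLoopA target vws max_depth f (frontier.map (fun w => (w, d))) vis =
      pvLevelLoop target (pvBuildIndex vws) max_depth f d frontier vis := by
  intro f
  induction f using Nat.strong_induction_on with
  | _ f ih =>
    intro d frontier vis
    match frontier with
    | [] =>
      rw [pvLevelLoop]
      match f with
      | 0 => rfl
      | _ + 1 => rfl
    | w :: ws =>
      rw [pvLevelLoop]
      by_cases hd : d > max_depth
      · rw [if_pos hd]
        match f with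
        | 0 => rfl
        | f + 1 =>
          show pvLoopA target vws max_depth (f + 1)
              ((w, d) :: ws.map (fun w => (w, d))) vis = false
          unfold pvLoopA
          rw [if_pos hd]
      · rw [if_neg hd]
        have hmap : (w :: ws).map (fun w => (w, d)) =
            (w :: ws).map (fun w => (w, d)) ++ ([] : List String).map (fun w => (w, d + 1)) := by
          simp
        rw [hmap, pvLevel_eq target vws max_depth d hd (w :: ws) vis [] f]
        cases hE : pvExpand target (pvBuildIndex vws) (w :: ws) vis [] f with
        | inl b => rfl
        | inr t =>
          obtain ⟨vis', nxt', f'⟩ := t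
          exact ih f' (pvExpand_fuel_lt target (pvBuildIndex vws) w ws vis [] f vis' nxt' f' hE) _ _ _

-- ===== VERDICT (by name: the statement is the Claim_ definition above) =====
theorem has_valid_ladder_spec : Claim_equal_has_valid_ladder := by
  intro start target vws md _
  unfold Spec_has_valid_ladder has_valid_ladder has_valid_ladder_alt
  have h : [(start, (0 : Int))] = [start].map (fun w => (w, (0 : Int))) := by simp
  rw [h, pvMain_eq target vws md (vws.length + 2) 0 [start] (PySem.Set.ofList [start])]
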